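-- pv_equiv track=rewrite | github.com/sejong-algorithm-study/algorithm | sally2596/BOJ/62050.py | solution
-- ===== SOURCE A (Python) =====
-- import heapq
--
-- dx = [1, 0, -1, 0]
--
-- dy = [0, -1, 0, 1]
--
-- def solution(land, height):
--     answer = 0
--     n = len(land)
--     visited = [[0 for i in range(n)] for _ in range(n)]
--     heap =[[0,0,0]]
--     while heap:
--         length,x,y = heapq.heappop(heap)
--         if visited[x][y]:
--             continue
--         visited[x][y]=1
--         answer+=length
--         for i in range(4):
--             nowx = x + dx[i]
--             nowy = y + dy[i]
--             if 0<=nowx<n and 0<=nowy<n and visited[nowx][nowy]==0: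
--                 if abs(abs(land[nowx][nowy])-abs(land[x][y]))>height:
--                     heapq.heappush(heap,[abs(abs(land[nowx][nowy])-abs(land[x][y])),nowx,nowy])
--                 else:
--                     heapq.heappush(heap,[0,nowx,nowy])
--     return answer
-- ===== SOURCE B (Python) =====
-- def solution(land, height):
--     # Prim's MST without a heap: a frontier dict of best-known connection
--     # costs with decrease-key updates; each round extract the lex-min item.
--     n = len(land)
--     best = {(0, 0): 0}
--     seen = set()
--     answer = 0
--     while best:
--         (d, x, y) = min((d, x, y) for (x, y), d in best.items())
--         del best[(x, y)]
--         seen.add((x, y))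
--         answer += d
--         for (nx, ny) in ((x + 1, y), (x, y - 1), (x - 1, y), (x, y + 1)):
--             if 0 <= nx < n and 0 <= ny < n and (nx, ny) not in seen:
--                 diff = abs(abs(land[nx][ny]) - abs(land[x][y]))
--                 wt = diff if diff > height else 0
--                 if (nx, ny) not in best or wt < best[(nx, ny)]:
--                     best[(nx, ny)] = wt
--     return answer
-- ===== Notes on version B (the rewrite author's own statement) =====
-- stated objective: alternative
-- what changed: A's lazy-deletion heapq (Prim's algorithm with stale entries skipped via a visited matrix) is replaced by a frontier dictionary with decrease-key updates and a linear scan for the lexicographically minimal item each round; no heap, no duplicate entries, no visited matrix.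
import Mathlib
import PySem

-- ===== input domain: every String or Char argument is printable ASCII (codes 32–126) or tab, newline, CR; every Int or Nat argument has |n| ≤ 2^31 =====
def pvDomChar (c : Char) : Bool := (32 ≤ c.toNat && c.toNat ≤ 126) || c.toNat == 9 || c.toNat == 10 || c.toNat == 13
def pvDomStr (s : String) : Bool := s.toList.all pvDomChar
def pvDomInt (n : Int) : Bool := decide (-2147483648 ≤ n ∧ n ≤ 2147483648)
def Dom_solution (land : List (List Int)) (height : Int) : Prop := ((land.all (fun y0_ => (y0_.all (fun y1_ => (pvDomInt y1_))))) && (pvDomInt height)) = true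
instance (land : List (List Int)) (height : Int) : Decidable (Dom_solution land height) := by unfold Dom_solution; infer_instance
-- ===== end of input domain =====

-- B replaces A's lazy-deletion binary heap + visited matrix (Prim with a heap) by a
-- frontier dict with decrease-key updates and a linear min scan; same return values.

-- shared small helpers: Python's lexicographic order on [length, x, y] triples,
-- the 4 neighbour offsets ((dx[i], dy[i]) in A's i = 0..3 order), and the edge weight.
def pvLeE (a b : Int × Int × Int) : Bool :=
  decide (a.1 < b.1 ∨ (a.1 = b.1 ∧ (a.2.1 < b.2.1 ∨ (a.2.1 = b.2.1 ∧ a.2.2 ≤ b.2.2))))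

def pvMinE (a b : Int × Int × Int) : Int × Int × Int := if pvLeE a b then a else b

def pvDirs : List (Int × Int) := [(1, 0), (0, -1), (-1, 0), (0, 1)]

def pvCell (m : List (List Int)) (x y : Int) : Int := (m.getD x.toNat []).getD y.toNat 0

def pvW (land : List (List Int)) (height x y nx ny : Int) : Int :=
  if |(|pvCell land nx ny| - |pvCell land x y|)| > height
  then |(|pvCell land nx ny| - |pvCell land x y|)| else 0

-- ===== PORT A =====
-- heapq.heappop as "remove one lexicographically minimal entry" (library call, by contract)
def pvHeapPop (h : List (Int × Int × Int)) : Option ((Int × Int × Int) × List (Int × Int × Int)) :=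
  match h with
  | [] => none
  | e :: rest => let m := rest.foldl pvMinE e; some (m, h.erase m)

def pvSet2 (vis : List (List Int)) (x y : Int) : List (List Int) :=
  vis.set x.toNat ((vis.getD x.toNat []).set y.toNat 1)

def pvZeros (vis : List (List Int)) : Nat := (vis.map (fun r => r.count 0)).sum

-- one neighbour step of A's push loop (the body of 'for i in range(4)')
def pvPushA (land : List (List Int)) (height n x y : Int) (vis' : List (List Int))
    (h : List (Int × Int × Int)) (dd : Int × Int) : List (Int × Int × Int) :=
  let nx := x + dd.1; let ny := y + dd.2
  if 0 ≤ nx ∧ nx < n ∧ 0 ≤ ny ∧ ny < n ∧ pvCell vis' nx ny = 0 then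
    h ++ [(pvW land height x y nx ny, nx, ny)] else h

theorem pvPushA_len (land : List (List Int)) (height n x y : Int) (vis' : List (List Int))
    (cs : List (Int × Int)) (h : List (Int × Int × Int)) :
    (cs.foldl (pvPushA land height n x y vis') h).length ≤ h.length + cs.length := by
  induction cs generalizing h with
  | nil => simp
  | cons c cs ih =>
    simp only [List.foldl_cons]
    refine le_trans (ih _) ?_
    show (pvPushA land height n x y vis' h c).length + cs.length ≤ h.length + (c :: cs).length
    unfold pvPushA
    simp only
    split <;> simp <;> omega

theorem count_set_one (r : List Int) (j : Nat) (hj : j < r.length) (h0 : r.getD j 0 = 0) :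
    (r.set j 1).count 0 < r.count 0 := by
  induction r generalizing j with
  | nil => simp at hj
  | cons x xs ih =>
    cases j with
    | zero =>
      simp only [List.getD, List.getElem?_cons_zero] at h0
      simp at h0
      simp [List.set, h0, List.count_cons]
    | succ j =>
      simp only [List.set]
      have hj' : j < xs.length := by simpa using hj
      have h0' : xs.getD j 0 = 0 := by simpa [List.getD] using h0
      have := ih j hj' h0'
      simp only [List.count_cons, List.set]
      omega

theorem pvZeros_set2 (vis : List (List Int)) (x y : Int)
    (hx : x.toNat < vis.length) (hy : y.toNat < (vis.getD x.toNat []).length)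
    (hv : pvCell vis x y = 0) : pvZeros (pvSet2 vis x y) < pvZeros vis := by
  unfold pvZeros pvSet2
  unfold pvCell at hv
  induction vis generalizing x with
  | nil => simp at hx
  | cons r rs ih =>
    cases hxx : x.toNat with
    | zero =>
      rw [hxx] at hv hy
      simp only [List.getD, List.getElem?_cons_zero, Option.getD_some] at hv hy
      simp only [List.set, List.map_cons, List.sum_cons]
      have := count_set_one r y.toNat (by simpa using hy) (by simpa [List.getD] using hv)
      simp only [List.getD, List.getElem?_cons_zero, Option.getD_some]
      omega
    | succ k =>
      rw [hxx] at hv hy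
      simp only [List.getD, List.getElem?_cons_succ] at hv hy
      have hx' : k < rs.length := by rw [hxx] at hx; simpa using hx
      have hthis := ih (Int.ofNat k) (by simpa using hx') (by simpa [List.getD] using hy)
        (by simpa [List.getD] using hv)
      simp only [show (Int.ofNat k).toNat = k from rfl] at hthis
      simp only [List.set, List.map_cons, List.sum_cons, List.getD_cons_succ]
      omega

theorem pvLeE_refl (a : Int × Int × Int) : pvLeE a a := by simp [pvLeE]

theorem pvLeE_total (a b : Int × Int × Int) : pvLeE a b ∨ pvLeE b a := by
  simp only [pvLeE, decide_eq_true_eq]; omega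

theorem pvLeE_trans {a b c : Int × Int × Int} (h1 : pvLeE a b) (h2 : pvLeE b c) : pvLeE a c := by
  simp only [pvLeE, decide_eq_true_eq] at *; omega

theorem foldl_minE_mem (a : Int × Int × Int) (l : List (Int × Int × Int)) :
    l.foldl pvMinE a ∈ a :: l := by
  induction l generalizing a with
  | nil => simp
  | cons x xs ih =>
    simp only [List.foldl_cons]
    have h := ih (pvMinE a x)
    rcases List.mem_cons.1 h with h | h
    · rw [h]
      unfold pvMinE
      split <;> simp
    · simp [h]

theorem foldl_minE_le (a : Int × Int × Int) (l : List (Int × Int × Int)) :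
    ∀ e ∈ a :: l, pvLeE (l.foldl pvMinE a) e := by
  induction l generalizing a with
  | nil => intro e he; simp at he; subst he; exact pvLeE_refl _
  | cons x xs ih =>
    intro e he
    simp only [List.foldl_cons]
    have hmin : pvLeE (pvMinE a x) a ∧ pvLeE (pvMinE a x) x := by
      unfold pvMinE
      rcases pvLeE_total a x with h | h
      · simp [h, pvLeE_refl]
      · by_cases h' : pvLeE a x = true <;> simp [h', h, pvLeE_refl]
    rcases List.mem_cons.1 he with h | h
    · rw [h]
      exact pvLeE_trans (ih (pvMinE a x) _ (List.mem_cons_self)) hmin.1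
    · rcases List.mem_cons.1 h with h' | h'
      · rw [h']
        exact pvLeE_trans (ih (pvMinE a x) _ (List.mem_cons_self)) hmin.2
      · exact ih (pvMinE a x) _ (List.mem_cons.2 (Or.inr h'))

theorem pvHeapPop_some {h : List (Int × Int × Int)} {m : Int × Int × Int}
    {rest : List (Int × Int × Int)} (hp : pvHeapPop h = some (m, rest)) :
    m ∈ h ∧ rest = h.erase m ∧ ∀ e ∈ h, pvLeE m e := by
  match h, hp with
  | e :: tl, hp =>
    unfold pvHeapPop at hp
    simp only [Option.some.injEq, Prod.mk.injEq] at hp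
    obtain ⟨h1, h2⟩ := hp
    subst h1
    exact ⟨foldl_minE_mem e tl, h2.symm, foldl_minE_le e tl⟩

-- the while-loop of A; guards beyond Python's 'if visited[x][y]' only make the recursion total
def solutionLoopA (land : List (List Int)) (height n : Int) (ans : Int)
    (vis : List (List Int)) (heap : List (Int × Int × Int)) : Int :=
  match hpop : pvHeapPop heap with
  | none => ans
  | some (m, rest) =>
    let x := m.2.1
    let y := m.2.2
    if hv : 0 ≤ x ∧ x.toNat < vis.length ∧ 0 ≤ y ∧ y.toNat < (vis.getD x.toNat []).length ∧
        pvCell vis x y = 0 then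
      let vis' := pvSet2 vis x y
      let heap' := pvDirs.foldl (pvPushA land height n x y vis') rest
      solutionLoopA land height n (ans + m.1) vis' heap'
    else
      solutionLoopA land height n ans vis rest
  termination_by 4 * pvZeros vis + heap.length
  decreasing_by
  · obtain ⟨hm, hrest, _⟩ := pvHeapPop_some hpop
    have hlen : rest.length = heap.length - 1 := by
      rw [hrest]; exact List.length_erase_of_mem hm
    have h1 : (pvDirs.foldl (pvPushA land height n m.2.1 m.2.2 (pvSet2 vis m.2.1 m.2.2)) rest).length
        ≤ rest.length + 4 := pvPushA_len _ _ _ _ _ _ pvDirs rest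
    have h2 := pvZeros_set2 vis m.2.1 m.2.2 hv.2.1 hv.2.2.2.1 hv.2.2.2.2
    have h3 : 1 ≤ heap.length := by
      cases heap; · simp [pvHeapPop] at hpop
      · simp
    omega
  · obtain ⟨hm, hrest, _⟩ := pvHeapPop_some hpop
    have hlen : rest.length = heap.length - 1 := by
      rw [hrest]; exact List.length_erase_of_mem hm
    have h3 : 1 ≤ heap.length := by
      cases heap; · simp [pvHeapPop] at hpop
      · simp
    omega

def solution (land : List (List Int)) (height : Int) : Int :=
  let n := (land.length : Int)
  solutionLoopA land height n 0
    (List.replicate land.length (List.replicate land.length 0)) [(0, 0, 0)]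

-- ===== PORT B =====
def pvTriple (p : (Int × Int) × Int) : Int × Int × Int := (p.2, p.1.1, p.1.2)

def pvCells (n : Int) : List (Int × Int) :=
  (PySem.List.pyRange 0 n 1).flatMap (fun i => (PySem.List.pyRange 0 n 1).map (fun j => (i, j)))

def pvUnseen (n : Int) (seen : PySem.Set (Int × Int)) : Nat :=
  ((pvCells n).filter (fun v => !seen.contains v)).length

-- one neighbour step of B's relaxation loop
def pvRelaxB (land : List (List Int)) (height n x y : Int) (seen' : PySem.Set (Int × Int))
    (b : PySem.Dict (Int × Int) Int) (dd : Int × Int) : PySem.Dict (Int × Int) Int :=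
  let nx := x + dd.1; let ny := y + dd.2
  if 0 ≤ nx ∧ nx < n ∧ 0 ≤ ny ∧ ny < n ∧ ¬ seen'.contains (nx, ny) then
    match b.get? (nx, ny) with
    | none => b.insert (nx, ny) (pvW land height x y nx ny)
    | some cur =>
        if pvW land height x y nx ny < cur then b.insert (nx, ny) (pvW land height x y nx ny)
        else b
  else b

theorem set_contains_add {α : Type} [BEq α] [LawfulBEq α] (s : PySem.Set α) (v u : α) :
    (PySem.Set.add s v).contains u = (s.contains u || u == v) := by
  unfold PySem.Set.add
  by_cases h : s.contains v = true
  · simp only [h, if_true]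
    by_cases hu : u = v
    · subst hu
      simp [h, (PySem.Set.contains_iff s u).1 h]
    · simp [hu]
  · simp only [h, if_false, Bool.false_eq_true]
    unfold PySem.Set.contains at *
    simp only [List.contains_append]
    by_cases hu : u = v <;> simp [hu]

theorem mem_pvCells (n : Int) (v : Int × Int) :
    v ∈ pvCells n ↔ 0 ≤ v.1 ∧ v.1 < n ∧ 0 ≤ v.2 ∧ v.2 < n := by
  obtain ⟨x, y⟩ := v
  simp only [pvCells, List.mem_flatMap, List.mem_map]
  constructor
  · rintro ⟨i, hi, j, hj, h⟩
    rw [PySem.List.mem_pyRange_one] at hi hj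
    injection h with h1 h2
    subst h1; subst h2
    refine ⟨by omega, by omega, by omega, by omega⟩
  · rintro ⟨h1, h2, h3, h4⟩
    exact ⟨x, by rw [PySem.List.mem_pyRange_one]; omega, y,
      by rw [PySem.List.mem_pyRange_one]; omega, rfl⟩

theorem filter_le_of_imp {α : Type} (p q : α → Bool) (l : List α)
    (hpq : ∀ a ∈ l, q a = true → p a = true) :
    (l.filter q).length ≤ (l.filter p).length := by
  induction l with
  | nil => simp
  | cons x xs ih =>
    have ih' := ih (fun b hb h => hpq b (List.mem_cons_of_mem _ hb) h)
    simp only [List.filter_cons]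
    by_cases hq : q x = true
    · simp [hq, hpq x List.mem_cons_self hq]; omega
    · simp only [Bool.not_eq_true] at hq
      simp only [hq, Bool.false_eq_true, if_false]
      split <;> simp <;> omega

theorem filter_length_lt {α : Type} (p q : α → Bool) (l : List α)
    (hpq : ∀ a ∈ l, q a = true → p a = true)
    (a : α) (ha : a ∈ l) (hpa : p a = true) (hqa : q a = false) :
    (l.filter q).length < (l.filter p).length := by
  induction l with
  | nil => simp at ha
  | cons x xs ih =>
    have hsub := filter_le_of_imp p q xs (fun b hb h => hpq b (List.mem_cons_of_mem _ hb) h)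
    simp only [List.filter_cons]
    rcases List.mem_cons.1 ha with h | h
    · subst h
      simp [hpa, hqa]
      omega
    · have hlt := ih (fun b hb h => hpq b (List.mem_cons_of_mem _ hb) h) h
      by_cases hq : q x = true
      · simp [hq, hpq x List.mem_cons_self hq]; omega
      · simp only [Bool.not_eq_true] at hq
        simp only [hq, Bool.false_eq_true, if_false]
        split <;> simp <;> omega

theorem pvUnseen_add_lt (n : Int) (seen : PySem.Set (Int × Int)) (v : Int × Int)
    (hg : 0 ≤ v.1 ∧ v.1 < n ∧ 0 ≤ v.2 ∧ v.2 < n) (hs : seen.contains v = false) :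
    pvUnseen n (PySem.Set.add seen v) < pvUnseen n seen := by
  unfold pvUnseen
  refine filter_length_lt _ _ _ ?_ v ((mem_pvCells n v).2 hg) ?_ ?_
  · intro a _ h
    simp only [Bool.not_eq_true'] at h ⊢
    rw [set_contains_add] at h
    exact (Bool.or_eq_false_iff.1 h).1
  · show (!seen.contains v) = true
    rw [hs]; rfl
  · show (!(PySem.Set.add seen v).contains v) = false
    rw [set_contains_add]
    simp

theorem dict_size_erase_lt {κ ν : Type} [BEq κ] [LawfulBEq κ] (d : PySem.Dict κ ν) (k : κ)
    (h : ∃ p ∈ d.items, p.1 = k) : (d.erase k).size < d.size := by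
  obtain ⟨p, hp, hpk⟩ := h
  unfold PySem.Dict.erase PySem.Dict.size
  simp only
  refine List.length_filter_lt_length_iff_exists.2 ?_
  exact ⟨p, hp, by simp [hpk]⟩

theorem foldl_minE_triple_mem (p : (Int × Int) × Int) (ps : List ((Int × Int) × Int)) :
    ∃ q ∈ p :: ps, (ps.map pvTriple).foldl pvMinE (pvTriple p) = pvTriple q := by
  have h := foldl_minE_mem (pvTriple p) (ps.map pvTriple)
  rw [show pvTriple p :: ps.map pvTriple = (p :: ps).map pvTriple from rfl] at h
  obtain ⟨q, hq, hq2⟩ := List.mem_map.1 h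
  exact ⟨q, hq, hq2.symm⟩

-- the while-loop of B; the in-grid/not-seen guard only makes the recursion total
def solutionLoopB (land : List (List Int)) (height n : Int) (ans : Int)
    (seen : PySem.Set (Int × Int)) (best : PySem.Dict (Int × Int) Int) : Int :=
  match hb : best.items with
  | [] => ans
  | p :: ps =>
    let m := (ps.map pvTriple).foldl pvMinE (pvTriple p)
    let x := m.2.1
    let y := m.2.2
    let best' := best.erase (x, y)
    if hg : (0 ≤ x ∧ x < n ∧ 0 ≤ y ∧ y < n) ∧ ¬ seen.contains (x, y) then
      let seen' := seen.add (x, y)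
      let best'' := pvDirs.foldl (pvRelaxB land height n x y seen') best'
      solutionLoopB land height n (ans + m.1) seen' best''
    else
      solutionLoopB land height n ans seen best'
  termination_by (pvUnseen n seen, best.size)
  decreasing_by
  · left
    refine pvUnseen_add_lt n seen _ hg.1 ?_
    cases hc : PySem.Set.contains seen _
    · rfl
    · exact absurd hc hg.2
  · refine Prod.Lex.right _ ?_
    simp only [List.attach_map_val]
    obtain ⟨q, hq, hq2⟩ := foldl_minE_triple_mem p ps
    refine dict_size_erase_lt best _ ⟨q, ?_, ?_⟩
    · rw [hb]; exact hq
    · rw [hq2]; rfl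

def solution_alt (land : List (List Int)) (height : Int) : Int :=
  let n := (land.length : Int)
  solutionLoopB land height n 0 PySem.Set.empty (PySem.Dict.mk [((0, 0), 0)])

-- ===== PRECONDITION & SPEC =====
-- Pre_ excludes exactly the inputs where Python A raises IndexError: the empty grid
-- (visited[0][0] on the first pop) and, for n ≥ 2, a row shorter than n = len(land)
-- (land[x][y] is eventually read for every cell of the n×n grid; n = 1 reads no land cell).
def Pre_solution (land : List (List Int)) (height : Int) : Prop :=
  0 < land.length ∧ (land.length = 1 ∨ ∀ row ∈ land, land.length ≤ row.length)
instance (land : List (List Int)) (height : Int) : Decidable (Pre_solution land height) := by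
  unfold Pre_solution; infer_instance

def pvWitness_solution : List (List Int) × Int := ([[1, 3], [9, 2]], 1)

def Spec_solution (land : List (List Int)) (height : Int) (out : Int) : Prop :=
  out = solution_alt land height
instance (land : List (List Int)) (height : Int) (out : Int) : Decidable (Spec_solution land height out) := by
  unfold Spec_solution; infer_instance

-- ===== CLAIM (what is proved, stated in full; the proofs are below) =====
def Claim_equal_solution : Prop := ∀ (land : List (List Int)) (height : Int),
  Dom_solution land height → Pre_solution land height → Spec_solution land height (solution land height)

-- ===== LEMMAS AND PROOFS =====

theorem pvLeE_antisymm {a b : Int × Int × Int} (h1 : pvLeE a b) (h2 : pvLeE b a) : a = b := by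
  simp only [pvLeE, decide_eq_true_eq] at *
  obtain ⟨a1, a2, a3⟩ := a; obtain ⟨b1, b2, b3⟩ := b
  simp_all; omega

theorem pvHeapPop_none (h : List (Int × Int × Int)) : pvHeapPop h = none ↔ h = [] := by
  cases h <;> simp [pvHeapPop]


-- in-grid predicate and per-vertex heap keys
abbrev pvInG (n x y : Int) : Prop := 0 ≤ x ∧ x < n ∧ 0 ≤ y ∧ y < n

def pvLens (u : Int × Int) (h : List (Int × Int × Int)) : List Int :=
  (h.filter (fun e => e.2 == u)).map (fun e => e.1)

-- the simulation invariant between A's state (vis, heap) and B's state (seen, best)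
def pvInv (n : Int) (vis : List (List Int)) (seen : PySem.Set (Int × Int))
    (best : PySem.Dict (Int × Int) Int) (heap : List (Int × Int × Int)) : Prop :=
  vis.length = n.toNat ∧
  (∀ r ∈ vis, r.length = n.toNat) ∧
  (∀ x y : Int, pvInG n x y → (pvCell vis x y = 0 ↔ seen.contains (x, y) = false)) ∧
  (∀ e ∈ heap, pvInG n e.2.1 e.2.2) ∧
  best.keys.Nodup ∧
  (∀ u : Int × Int, best.get? u =
    if pvInG n u.1 u.2 ∧ seen.contains u = false then (pvLens u heap).min? else none)

theorem filter_erase_not_pred {α : Type} [BEq α] [LawfulBEq α] (p : α → Bool) (m : α)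
    (hp : p m = false) : ∀ l : List α, (l.erase m).filter p = l.filter p := by
  intro l
  induction l with
  | nil => simp
  | cons x xs ih =>
    by_cases hx : x = m
    · subst hx
      simp [List.erase_cons_head, List.filter_cons, hp]
    · rw [List.erase_cons_tail (by simp [hx])]
      simp only [List.filter_cons, ih]

theorem pvLens_erase_ne (u : Int × Int) (h : List (Int × Int × Int)) (m : Int × Int × Int)
    (hne : ¬ m.2 = u) : pvLens u (h.erase m) = pvLens u h := by
  unfold pvLens
  rw [filter_erase_not_pred _ m (by simpa using hne)]

theorem pvLens_mem (u : Int × Int) (h : List (Int × Int × Int)) (d : Int) :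
    d ∈ pvLens u h ↔ (d, u.1, u.2) ∈ h := by
  unfold pvLens
  simp only [List.mem_map, List.mem_filter]
  constructor
  · rintro ⟨e, ⟨he, hu⟩, hd⟩
    have : e = (d, u.1, u.2) := by
      obtain ⟨e1, e2⟩ := e
      simp at hu hd
      simp [hd, hu]
    rwa [this] at he
  · intro hmem
    exact ⟨(d, u.1, u.2), ⟨hmem, by simp⟩, rfl⟩

theorem pvLens_append_singleton (u : Int × Int) (h : List (Int × Int × Int))
    (e : Int × Int × Int) :
    pvLens u (h ++ [e]) = pvLens u h ++ (if e.2 = u then [e.1] else []) := by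
  unfold pvLens
  rw [List.filter_append]
  by_cases he : e.2 = u
  · have hb : (e.2 == u) = true := by simpa using he
    simp [List.filter, hb, he]
  · have hb : (e.2 == u) = false := by simpa using he
    simp [List.filter, hb, he]

theorem min?_append_singleton (l : List Int) (a : Int) :
    (l ++ [a]).min? = some ((l.min?.elim a (fun b => min b a))) := by
  induction l with
  | nil => simp
  | cons x xs ih =>
    simp only [List.cons_append, List.min?_cons, ih]
    cases h : xs.min? with
    | none =>
      simp at h; subst h; simp [min_comm]
    | some b => simp [min_assoc]

theorem getD_mem {α : Type} (l : List α) (i : Nat) (d : α) (hi : i < l.length) :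
    l.getD i d ∈ l := by
  simp only [List.getD, List.getElem?_eq_getElem hi, Option.getD_some]
  exact List.getElem_mem hi

theorem getD_set_list {alpha : Type} (l : List alpha) (i j : Nat) (a d : alpha) :
    (l.set i a).getD j d = if i = j ∧ i < l.length then a else l.getD j d := by
  simp only [List.getD, List.getElem?_set]
  by_cases hij : i = j
  · subst hij
    by_cases hil : i < l.length
    · simp [hil]
    · rw [List.getElem?_eq_none (by omega)]
      simp [hil]
  · simp [hij]

theorem length_pvSet2 (vis : List (List Int)) (x y : Int) :
    (pvSet2 vis x y).length = vis.length := by simp [pvSet2]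

theorem rows_pvSet2 (vis : List (List Int)) (x y : Int) (r : List Int)
    (hr : r ∈ pvSet2 vis x y) : r.length = (vis.getD x.toNat []).length ∨ r ∈ vis := by
  unfold pvSet2 at hr
  rcases List.mem_or_eq_of_mem_set hr with h | h
  · exact Or.inr h
  · left; rw [h]; simp

theorem pvCell_set2 (vis : List (List Int)) (x y x' y' : Int)
    (hx : 0 ≤ x) (hy : 0 ≤ y) (hx' : 0 ≤ x') (hy' : 0 ≤ y')
    (hxl : x.toNat < vis.length) (hyl : y.toNat < (vis.getD x.toNat []).length) :
    pvCell (pvSet2 vis x y) x' y' =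
      if x' = x ∧ y' = y then 1 else pvCell vis x' y' := by
  unfold pvCell pvSet2
  rw [getD_set_list]
  by_cases hxx : x.toNat = x'.toNat
  · have hx'' : x' = x := by omega
    simp only [hx'', if_pos rfl, ← hxx, hxl, if_pos (And.intro rfl hxl), and_self, if_true]
    rw [getD_set_list]
    by_cases hyy : y.toNat = y'.toNat
    · have h1 : y' = y := by omega
      rw [if_pos ⟨hyy, hyl⟩, if_pos ⟨trivial, h1⟩]
    · have h1 : ¬ y' = y := by omega
      simp [hyy, h1]
  · have h1 : ¬ x' = x := by omega
    simp [hxx, h1]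

theorem find?_filter_keyne {kappa nu : Type} [BEq kappa] [LawfulBEq kappa]
    (l : List (kappa × nu)) (k u : kappa) (h : ¬ u = k) :
    (l.filter (fun p => !p.1 == k)).find? (fun p => p.1 == u) = l.find? (fun p => p.1 == u) := by
  induction l with
  | nil => simp
  | cons p ps ih =>
    by_cases hpk : p.1 = k
    · have hpu : (p.1 == u) = false := by simp [hpk]; exact fun e => h (e ▸ rfl)
      simp only [List.filter_cons, hpk, beq_self_eq_true, Bool.not_true, Bool.false_eq_true,
        if_false, ih, List.find?_cons, hpu]
      have hk : (k == u) = false := by simp; exact fun e => h (e ▸ rfl)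
      rw [hpk] at hpu
      simp [hpu]
    · simp only [List.filter_cons, beq_eq_false_iff_ne, ne_eq]
      rw [if_pos (by simp [hpk])]
      simp only [List.find?_cons]
      cases hq : (p.1 == u) <;> simp [hq, ih]

theorem dict_get?_erase {kappa nu : Type} [BEq kappa] [LawfulBEq kappa] [DecidableEq kappa]
    (d : PySem.Dict kappa nu) (k u : kappa) :
    (d.erase k).get? u = if u = k then none else d.get? u := by
  unfold PySem.Dict.erase PySem.Dict.get?
  by_cases h : u = k
  · subst h
    simp only [if_pos rfl]
    rw [List.find?_eq_none.2]
    · rfl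
    · intro p hp
      have := (List.mem_filter.1 hp).2
      simpa using this
  · rw [if_neg h, find?_filter_keyne _ _ _ h]

theorem dict_keys_erase_sublist {kappa nu : Type} [BEq kappa] (d : PySem.Dict kappa nu)
    (k : kappa) : (d.erase k).keys.Sublist d.keys := by
  unfold PySem.Dict.erase PySem.Dict.keys
  exact List.Sublist.map _ List.filter_sublist

theorem dict_nodup_keys_erase {kappa nu : Type} [BEq kappa] (d : PySem.Dict kappa nu)
    (k : kappa) (h : d.keys.Nodup) : (d.erase k).keys.Nodup :=
  (dict_keys_erase_sublist d k).nodup h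

-- one parallel step of A's push loop and B's relaxation loop preserves the
-- per-vertex-minimum correspondence
theorem pvRelaxPushR (land : List (List Int)) (height n x y : Int)
    (vis' : List (List Int)) (seen' : PySem.Set (Int × Int))
    (hIII : ∀ x' y' : Int, pvInG n x' y' →
      (pvCell vis' x' y' = 0 ↔ seen'.contains (x', y') = false)) :
    ∀ (cs : List (Int × Int)) (h : List (Int × Int × Int)) (b : PySem.Dict (Int × Int) Int),
      b.keys.Nodup →
      (∀ u : Int × Int, b.get? u =
        if pvInG n u.1 u.2 ∧ seen'.contains u = false then (pvLens u h).min? else none) →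
      (∀ e ∈ h, pvInG n e.2.1 e.2.2) →
      (cs.foldl (pvRelaxB land height n x y seen') b).keys.Nodup ∧
      (∀ u : Int × Int, (cs.foldl (pvRelaxB land height n x y seen') b).get? u =
        if pvInG n u.1 u.2 ∧ seen'.contains u = false then
          (pvLens u (cs.foldl (pvPushA land height n x y vis') h)).min? else none) ∧
      (∀ e ∈ cs.foldl (pvPushA land height n x y vis') h, pvInG n e.2.1 e.2.2) := by
  intro cs
  induction cs with
  | nil => intro h b h1 h2 h3; exact ⟨h1, h2, h3⟩
  | cons c cs ih =>
    intro h b h1 h2 h3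
    simp only [List.foldl_cons]
    set nx := x + c.1 with hnx
    set ny := y + c.2 with hny
    by_cases hgd : pvInG n nx ny
    · by_cases hcl : pvCell vis' nx ny = 0
      · -- both guards fire
        have hsc : seen'.contains (nx, ny) = false := (hIII nx ny hgd).1 hcl
        have hA : pvPushA land height n x y vis' h c
            = h ++ [(pvW land height x y nx ny, nx, ny)] := by
          unfold pvPushA
          rw [if_pos ⟨hgd.1, hgd.2.1, hgd.2.2.1, hgd.2.2.2, hcl⟩]
        have hguardB : (0 ≤ nx ∧ nx < n ∧ 0 ≤ ny ∧ ny < n ∧ ¬ seen'.contains (nx, ny) = true) := by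
          refine ⟨hgd.1, hgd.2.1, hgd.2.2.1, hgd.2.2.2, ?_⟩
          intro hmem
          rw [hsc] at hmem
          cases hmem
        have hget := h2 (nx, ny)
        rw [if_pos ⟨hgd, hsc⟩] at hget
        -- the dict after B's step and the value it stores at (nx, ny)
        have key : ∃ b' : PySem.Dict (Int × Int) Int,
            pvRelaxB land height n x y seen' b c = b' ∧ b'.keys.Nodup ∧
            (∀ u : Int × Int, b'.get? u =
              if u = (nx, ny) then
                some ((pvLens (nx, ny) h).min?.elim (pvW land height x y nx ny)
                  (fun d => min d (pvW land height x y nx ny)))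
              else b.get? u) := by
          unfold pvRelaxB
          rw [if_pos hguardB]
          cases hcur : b.get? (nx, ny) with
          | none =>
            refine ⟨_, rfl, PySem.Dict.nodup_keys_insert _ _ _ h1, fun u => ?_⟩
            rw [PySem.Dict.get?_insert]
            rw [hcur] at hget
            rw [← hget]
            rfl
          | some cur =>
            dsimp only
            rw [hcur] at hget
            by_cases hlt : pvW land height x y nx ny < cur
            · rw [if_pos hlt]
              refine ⟨_, rfl, PySem.Dict.nodup_keys_insert _ _ _ h1, fun u => ?_⟩
              rw [PySem.Dict.get?_insert]
              rw [← hget]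
              simp only [Option.elim_some]
              rw [min_eq_right (le_of_lt hlt)]
            · rw [if_neg hlt]
              refine ⟨_, rfl, h1, fun u => ?_⟩
              by_cases hu : u = (nx, ny)
              · subst hu
                rw [hcur, if_pos rfl, ← hget]
                simp only [Option.elim_some]
                rw [min_eq_left (by omega)]
              · rw [if_neg hu]
        obtain ⟨b', hb', hbn, hbg⟩ := key
        rw [hA, hb']
        refine ih (h ++ [(pvW land height x y nx ny, nx, ny)]) b' hbn ?_ ?_
        · intro u
          rw [hbg u]
          by_cases hu : u = (nx, ny)
          · subst hu
            rw [if_pos rfl, if_pos ⟨hgd, hsc⟩]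
            rw [pvLens_append_singleton, if_pos rfl, min?_append_singleton]
          · have hle : pvLens u (h ++ [(pvW land height x y nx ny, nx, ny)]) = pvLens u h := by
              rw [pvLens_append_singleton, if_neg (fun heq => hu heq.symm), List.append_nil]
            rw [if_neg hu, h2 u, hle]
        · intro e he
          rcases List.mem_append.1 he with he | he
          · exact h3 e he
          · simp only [List.mem_singleton] at he
            subst he
            exact hgd
      · -- in grid but already reached: both steps are no-ops
        have hsc : seen'.contains (nx, ny) = true := by
          cases hc : seen'.contains (nx, ny)
          · exact absurd ((hIII nx ny hgd).2 hc) hcl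
          · rfl
        have hA : pvPushA land height n x y vis' h c = h := by
          unfold pvPushA
          rw [if_neg (by rintro ⟨-, -, -, -, hc⟩; exact hcl hc)]
        have hB : pvRelaxB land height n x y seen' b c = b := by
          unfold pvRelaxB
          rw [if_neg (by rintro ⟨-, -, -, -, hc⟩; exact hc hsc)]
        rw [hA, hB]
        exact ih h b h1 h2 h3
    · -- out of the grid: both steps are no-ops
      have hA : pvPushA land height n x y vis' h c = h := by
        unfold pvPushA
        rw [if_neg (by rintro ⟨u1, u2, u3, u4, -⟩; exact hgd ⟨u1, u2, u3, u4⟩)]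
      have hB : pvRelaxB land height n x y seen' b c = b := by
        unfold pvRelaxB
        rw [if_neg (by rintro ⟨u1, u2, u3, u4, -⟩; exact hgd ⟨u1, u2, u3, u4⟩)]
      rw [hA, hB]
      exact ih h b h1 h2 h3

-- if the heap is exhausted, so is the frontier dict
theorem pv_items_nil (n : Int) (vis : List (List Int)) (seen : PySem.Set (Int × Int))
    (best : PySem.Dict (Int × Int) Int) (hinv : pvInv n vis seen best [])
    : best.items = [] := by
  cases hitems : best.items with
  | nil => rfl
  | cons p ps =>
    exfalso
    have hget : best.get? p.1 = some p.2 := by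
      unfold PySem.Dict.get?
      rw [hitems]
      simp [List.find?]
    rw [hinv.2.2.2.2.2 p.1] at hget
    revert hget
    split
    · intro hget
      simp [pvLens, List.min?] at hget
    · intro hget
      cases hget

theorem pv_loop_agree (land : List (List Int)) (height n : Int) (k : Nat) :
    ∀ (vis : List (List Int)) (heap : List (Int × Int × Int))
      (seen : PySem.Set (Int × Int)) (best : PySem.Dict (Int × Int) Int) (ans : Int),
      4 * pvZeros vis + heap.length ≤ k → pvInv n vis seen best heap →
      solutionLoopA land height n ans vis heap = solutionLoopB land height n ans seen best := by
  induction k with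
  | zero =>
    intro vis heap seen best ans hk hinv
    have hheap : heap = [] := by
      cases heap
      · rfl
      · simp at hk
    subst hheap
    rw [solutionLoopA]
    conv_lhs => whnf
    rw [solutionLoopB]
    have hitems := pv_items_nil n vis seen best hinv
    split
    · rfl
    · rename_i p ps heq
      rw [hitems] at heq
      cases heq
  | succ k ih =>
    intro vis heap seen best ans hk hinv
    obtain ⟨inv1, inv2, inv3, inv4, inv5, inv6⟩ := hinv
    rw [solutionLoopA]
    split
    · -- heap exhausted
      rename_i heq
      have hheap : heap = [] := (pvHeapPop_none heap).1 heq
      subst hheap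
      rw [solutionLoopB]
      have hitems := pv_items_nil n vis seen best ⟨inv1, inv2, inv3, inv4, inv5, inv6⟩
      split
      · rfl
      · rename_i p ps heq2
        rw [hitems] at heq2
        cases heq2
    · rename_i m rest heq
      obtain ⟨hm, hrest, hmin⟩ := pvHeapPop_some heq
      have hg : pvInG n m.2.1 m.2.2 := inv4 m hm
      have hlen1 : 1 ≤ heap.length := by
        cases heap
        · cases hm
        · simp
      have hrlen : rest.length = heap.length - 1 := by
        rw [hrest]; exact List.length_erase_of_mem hm
      by_cases hseen : seen.contains (m.2.1, m.2.2) = true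
      · -- A skips a stale entry; B's state is untouched
        rw [dif_neg]
        · refine ih vis rest seen best ans (by omega) ?_
          refine ⟨inv1, inv2, inv3, ?_, inv5, ?_⟩
          · intro e he
            exact inv4 e (by rw [hrest] at he; exact (List.erase_sublist).mem he)
          · intro u
            rw [inv6 u]
            by_cases hc : pvInG n u.1 u.2 ∧ seen.contains u = false
            · rw [if_pos hc, if_pos hc, hrest,
                pvLens_erase_ne u heap m (by
                  intro hme
                  rw [show m.2 = (m.2.1, m.2.2) from rfl, hme] at hseen
                  rw [hc.2] at hseen
                  cases hseen)]
            · rw [if_neg hc, if_neg hc]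
        · rintro ⟨-, -, -, -, hcell⟩
          rw [(inv3 m.2.1 m.2.2 hg).1 hcell] at hseen
          cases hseen
      · -- A visits m; B selects exactly the same vertex with the same key
        have hscf : seen.contains (m.2.1, m.2.2) = false := by
          cases hc : seen.contains (m.2.1, m.2.2)
          · rfl
          · exact absurd hc hseen
        have hcell : pvCell vis m.2.1 m.2.2 = 0 := (inv3 m.2.1 m.2.2 hg).2 hscf
        have hxb : m.2.1.toNat < vis.length := by
          have h1 := hg.1
          have h2 := hg.2.1
          rw [inv1]; omega
        have hyb : m.2.2.toNat < (vis.getD m.2.1.toNat []).length := by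
          have h1 := hg.2.2.1
          have h2 := hg.2.2.2
          rw [inv2 _ (getD_mem vis m.2.1.toNat [] hxb)]; omega
        -- the key B stores for m's vertex is exactly m's length
        have hgetv := inv6 (m.2.1, m.2.2)
        rw [if_pos ⟨hg, hscf⟩] at hgetv
        have hlm : m.1 ∈ pvLens (m.2.1, m.2.2) heap := by
          rw [pvLens_mem]
          exact hm
        have hsome : (pvLens (m.2.1, m.2.2) heap).min? = some m.1 := by
          cases hmq : (pvLens (m.2.1, m.2.2) heap).min? with
          | none =>
            rw [List.min?_eq_none_iff] at hmq
            rw [hmq] at hlm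
            cases hlm
          | some d =>
            obtain ⟨hdmem, hdle⟩ := List.min?_eq_some_iff.1 hmq
            have hdm : (d, m.2.1, m.2.2) ∈ heap := (pvLens_mem _ _ _).1 hdmem
            have hled : pvLeE m (d, m.2.1, m.2.2) := hmin _ hdm
            have hmd : m.1 ≤ d := by
              simp only [pvLeE, decide_eq_true_eq] at hled
              omega
            have : d = m.1 := le_antisymm (hdle _ hlm) hmd
            rw [this]
        rw [hsome] at hgetv
        have hv_items : ((m.2.1, m.2.2), m.1) ∈ best.items :=
          PySem.Dict.mem_items_of_get?_eq_some best hgetv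
        rw [dif_pos ⟨hg.1, hxb, hg.2.2.1, hyb, hcell⟩]
        rw [solutionLoopB]
        split
        · rename_i heq2
          rw [heq2] at hv_items
          cases hv_items
        · rename_i p ps heq2
          -- B's linear min scan returns exactly m
          have hmB : (ps.map pvTriple).foldl pvMinE (pvTriple p) = m := by
            obtain ⟨q, hq, hq2⟩ := foldl_minE_triple_mem p ps
            have hq_items : q ∈ best.items := by rw [heq2]; exact hq
            have hqget : best.get? q.1 = some q.2 :=
              PySem.Dict.get?_of_mem_items best hq_items inv5
            have hq6 := inv6 q.1
            rw [hqget] at hq6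
            have hcond : pvInG n q.1.1 q.1.2 ∧ seen.contains q.1 = false := by
              by_contra hc
              rw [if_neg hc] at hq6
              cases hq6
            rw [if_pos hcond] at hq6
            have hq2mem : q.2 ∈ pvLens q.1 heap := by
              obtain ⟨hqm, -⟩ := List.min?_eq_some_iff.1 hq6.symm
              exact hqm
            have hqheap : (q.2, q.1.1, q.1.2) ∈ heap := (pvLens_mem _ _ _).1 hq2mem
            have h1 : pvLeE m (pvTriple q) := hmin _ hqheap
            have h2 : pvLeE (pvTriple q) m := by
              rw [← hq2]
              refine foldl_minE_le (pvTriple p) (ps.map pvTriple) _ ?_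
              rw [show pvTriple p :: ps.map pvTriple = (p :: ps).map pvTriple from rfl,
                ← heq2]
              refine List.mem_map.2 ⟨((m.2.1, m.2.2), m.1), hv_items, rfl⟩
            rw [hq2]
            exact pvLeE_antisymm h2 h1
          rw [hmB]
          rw [dif_pos ⟨hg, by rw [hscf]; simp⟩]
          -- both sides recurse; re-establish the invariant
          have hIII' : ∀ x' y' : Int, pvInG n x' y' →
              (pvCell (pvSet2 vis m.2.1 m.2.2) x' y' = 0 ↔
               (seen.add (m.2.1, m.2.2)).contains (x', y') = false) := by
            intro x' y' hg'
            rw [pvCell_set2 vis m.2.1 m.2.2 x' y' hg.1 hg.2.2.1 hg'.1 hg'.2.2.1 hxb hyb,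
              set_contains_add]
            by_cases hxy : x' = m.2.1 ∧ y' = m.2.2
            · rw [if_pos hxy]
              have : ((x', y') == (m.2.1, m.2.2)) = true := by
                simp [hxy.1, hxy.2]
              rw [this]
              simp
            · rw [if_neg hxy]
              have : ((x', y') == (m.2.1, m.2.2)) = false := by
                simp only [beq_eq_false_iff_ne, ne_eq, Prod.mk.injEq]
                exact fun hc => hxy hc
              rw [this]
              rw [inv3 x' y' hg']
              simp
          have hR0 : ∀ u : Int × Int, (best.erase (m.2.1, m.2.2)).get? u =
              if pvInG n u.1 u.2 ∧ (seen.add (m.2.1, m.2.2)).contains u = false then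
                (pvLens u rest).min? else none := by
            intro u
            rw [dict_get?_erase]
            by_cases hu : u = (m.2.1, m.2.2)
            · rw [if_pos hu]
              have : (seen.add (m.2.1, m.2.2)).contains u = true := by
                rw [hu, set_contains_add]
                simp
              rw [if_neg (by rintro ⟨-, hc⟩; rw [this] at hc; cases hc)]
            · rw [if_neg hu, inv6 u]
              have hcc : (seen.add (m.2.1, m.2.2)).contains u = seen.contains u := by
                rw [set_contains_add]
                have : (u == (m.2.1, m.2.2)) = false := by
                  simpa using hu
                rw [this]
                simp
              rw [hcc, hrest, pvLens_erase_ne u heap m (by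
                intro hme
                exact hu (by rw [← hme]))]
          have hrest_grid : ∀ e ∈ rest, pvInG n e.2.1 e.2.2 := by
            intro e he
            exact inv4 e (by rw [hrest] at he; exact (List.erase_sublist).mem he)
          obtain ⟨hn', hr', hg'⟩ := pvRelaxPushR land height n m.2.1 m.2.2
            (pvSet2 vis m.2.1 m.2.2) (seen.add (m.2.1, m.2.2)) hIII' pvDirs rest
            (best.erase (m.2.1, m.2.2)) (dict_nodup_keys_erase best _ inv5) hR0 hrest_grid
          have hzero := pvZeros_set2 vis m.2.1 m.2.2 hxb hyb hcell
          have hplen := pvPushA_len land height n m.2.1 m.2.2 (pvSet2 vis m.2.1 m.2.2)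
            pvDirs rest
          refine ih (pvSet2 vis m.2.1 m.2.2) _ _ _ (ans + m.1)
            (by simp only [show pvDirs.length = 4 from rfl] at hplen; omega) ?_
          refine ⟨?_, ?_, hIII', hg', hn', hr'⟩
          · rw [length_pvSet2, inv1]
          · intro r hr
            rcases rows_pvSet2 vis m.2.1 m.2.2 r hr with h | h
            · rw [h]
              exact inv2 _ (getD_mem vis m.2.1.toNat [] hxb)
            · exact inv2 r h

theorem getD_replicate' {α : Type} (nn : Nat) (a : α) (i : Nat) (d : α) :
    (List.replicate nn a).getD i d = if i < nn then a else d := by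
  simp only [List.getD, List.getElem?_replicate]
  split <;> rfl

theorem pvCell_replicate (nn : Nat) (x y : Int) :
    pvCell (List.replicate nn (List.replicate nn 0)) x y = 0 := by
  unfold pvCell
  rw [getD_replicate']
  split
  · rw [getD_replicate']
    split <;> rfl
  · rfl

theorem pv_initial_inv (land : List (List Int)) (hn : 0 < land.length) :
    pvInv (land.length : Int) (List.replicate land.length (List.replicate land.length 0))
      PySem.Set.empty (PySem.Dict.mk [((0, 0), 0)]) [(0, 0, 0)] := by
  have hnI : (0 : Int) < (land.length : Int) := by exact_mod_cast hn
  refine ⟨by simp, by intro r hr; simp [List.eq_of_mem_replicate hr], ?_, ?_, by simp, ?_⟩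
  · intro x y _
    constructor
    · intro _; rfl
    · intro _; exact pvCell_replicate _ x y
  · rintro e he
    simp only [List.mem_singleton] at he
    subst he
    exact ⟨le_refl 0, hnI, le_refl 0, hnI⟩
  · intro u
    by_cases hu : u = (0, 0)
    · subst hu
      rw [if_pos ⟨⟨le_refl 0, hnI, le_refl 0, hnI⟩, rfl⟩]
      rfl
    · have heq : (((0, 0) : Int × Int) == u) = false := by
        simpa using fun e => hu (e.symm)
      have hget : (PySem.Dict.mk [(((0, 0) : Int × Int), (0 : Int))]).get? u = none := by
        rw [PySem.Dict.get?_mk_cons, heq]; rfl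
      have hlens : pvLens u [(0, 0, 0)] = [] := by
        unfold pvLens
        simp [List.filter, heq]
      refine hget.trans ?_
      split
      · rw [hlens]; rfl
      · rfl

-- ===== VERDICT (by name: the statement is the Claim_ definition above) =====
theorem solution_spec : Claim_equal_solution := by
  intro land height _ hpre
  unfold Spec_solution solution solution_alt
  exact pv_loop_agree land height (land.length : Int)
    (4 * pvZeros (List.replicate land.length (List.replicate land.length 0)) + 1)
    _ _ _ _ 0 (le_refl _) (pv_initial_inv land hpre.1)
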